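-- pv_equiv track=rewrite | github.com/pypi-data/pypi-code-90 | pwntools/pwntools-4.6.0.tar.gz/pwnlib/util/cyclic.py | metasploit_pattern
-- ===== SOURCE A (Python) =====
-- import string
--
-- def metasploit_pattern(sets = None):
--     """metasploit_pattern(sets = [ string.ascii_uppercase, string.ascii_lowercase, string.digits ]) -> generator
--
--     Generator for a sequence of characters as per Metasploit Framework's
--     `Rex::Text.pattern_create` (aka `pattern_create.rb`).
--
--     The returned generator will yield up to
--     ``len(sets) * reduce(lambda x,y: x*y, map(len, sets))`` elements.
--
--     Arguments:
--         sets: List of strings to generate the sequence over.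
--     """
--     sets = sets or [ string.ascii_uppercase, string.ascii_lowercase, string.digits ]
--     offsets = [ 0 ] * len(sets)
--     offsets_indexes_reversed = list(reversed(range(len(offsets))))
--
--     while True:
--         for i, j in zip(sets, offsets):
--             if isinstance(i, bytes):
--                 i = bytearray(i)
--             yield i[j]
--         # increment offsets with cascade
--         for i in offsets_indexes_reversed:
--             offsets[i] = (offsets[i] + 1) % len(sets[i])
--             if offsets[i] != 0:
--                 break
--         # finish up if we've exhausted the sequence
--         if offsets == [ 0 ] * len(sets):
--             return
-- ===== SOURCE B (Python) =====
-- import string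
--
-- def metasploit_pattern(sets = None):
--     """Stateless rewrite: the k-th combination of the sequence is the
--     mixed-radix representation of k, computed independently by divmod from
--     the index; no odometer state is carried between iterations."""
--     sets = sets or [ string.ascii_uppercase, string.ascii_lowercase, string.digits ]
--     sets = [ bytearray(s) if isinstance(s, bytes) else s for s in sets ]
--     lengths = [ len(s) for s in sets ]
--     total = 1
--     for n in lengths:
--         total *= n
--     for k in range(total):
--         out = []
--         r = k
--         for s, n in zip(reversed(sets), reversed(lengths)):
--             r, d = divmod(r, n)
--             out.append(s[d])
--         yield from reversed(out)
-- ===== Notes on version B (the rewrite author's own statement) =====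
-- stated objective: alternative
-- what changed: Replaces the stateful odometer (an offsets array with a reversed-index cascade increment carried across a while-True loop) by stateless index arithmetic: the k-th combination is computed independently as the mixed-radix digits of k via divmod, right-to-left, then yielded reversed.
import Mathlib
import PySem

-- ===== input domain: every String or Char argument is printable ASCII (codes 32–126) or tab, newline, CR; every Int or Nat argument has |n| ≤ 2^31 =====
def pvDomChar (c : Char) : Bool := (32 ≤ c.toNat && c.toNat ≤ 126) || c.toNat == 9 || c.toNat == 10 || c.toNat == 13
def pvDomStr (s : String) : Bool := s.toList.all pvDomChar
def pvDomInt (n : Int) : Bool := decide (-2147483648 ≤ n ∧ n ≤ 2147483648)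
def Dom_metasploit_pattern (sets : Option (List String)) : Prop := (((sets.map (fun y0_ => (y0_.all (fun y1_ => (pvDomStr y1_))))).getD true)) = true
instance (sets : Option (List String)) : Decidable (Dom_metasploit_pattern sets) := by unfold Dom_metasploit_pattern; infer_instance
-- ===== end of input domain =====

-- B replaces A's stateful offsets/cascade odometer by stateless index arithmetic:
-- the k-th combination is computed independently from k by divmod (objective: alternative).

-- `sets or [uppercase, lowercase, digits]`
def pvDefaultSets : List String :=
  ["ABCDEFGHIJKLMNOPQRSTUVWXYZ", "abcdefghijklmnopqrstuvwxyz", "0123456789"]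

-- ===== PORT A =====
-- i[j] for a str: one-character string ("" only when out of range, excluded by Pre_)
def pvCharStr (s : List Char) (o : Nat) : String :=
  match s[o]? with
  | some c => String.mk [c]
  | none => ""

-- the `for i, j in zip(sets, offsets): yield i[j]` pass
def pvYieldRow (ss : List (List Char)) (offs : List Nat) : List String :=
  List.zipWith pvCharStr ss offs

-- the reversed-index cascade increment; Bool = "no break happened" (carry out)
def pvInc : List (List Char) → List Nat → List Nat × Bool
  | [], _ => ([], true)
  | _, [] => ([], true)
  | s :: ss, o :: os =>
    let r := pvInc ss os
    if r.2 then
      let o' := (o + 1) % s.length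
      (o' :: r.1, o' == 0)
    else (o :: r.1, false)

-- the `while True` loop; fuel = number of combinations, the exact iteration count
def pvLoopA (ss : List (List Char)) : Nat → List Nat → List String
  | 0, _ => []
  | fuel + 1, offs =>
    let row := pvYieldRow ss offs
    let offs' := (pvInc ss offs).1
    if offs' = List.replicate ss.length 0 then row
    else row ++ pvLoopA ss fuel offs'

def metasploit_pattern (sets : Option (List String)) : List String :=
  let ss := (match sets with
    | none => pvDefaultSets
    | some [] => pvDefaultSets
    | some (x :: xs) => x :: xs).map String.toList
  pvLoopA ss (ss.foldl (fun a s => a * s.length) 1) (List.replicate ss.length 0)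

-- ===== PORT B =====
-- the inner `for s, n in zip(reversed(sets), reversed(lengths)): r, d = divmod(r, n); out.append(s[d])`
def pvDigitsFold (ss : List (List Char)) (k : Nat) : Nat × List Char :=
  ss.reverse.foldl (fun ro s => (ro.1 / s.length, ro.2 ++ [s.getD (ro.1 % s.length) ' '])) (k, [])

def metasploit_pattern_alt (sets : Option (List String)) : List String :=
  let ss := (match sets with
    | none => pvDefaultSets
    | some [] => pvDefaultSets
    | some (x :: xs) => x :: xs).map String.toList
  -- `total = 1; for n in lengths: total *= n`
  let total := ss.foldl (fun a s => a * s.length) 1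
  -- `for k in range(total): … yield from reversed(out)`
  (List.range total).flatMap (fun k =>
    (pvDigitsFold ss k).2.reverse.map (fun c => String.mk [c]))

-- ===== PRECONDITION & SPEC =====
-- Pre_ excludes a provided list containing an empty string: there A raises
-- IndexError while iterating; B naturally yields nothing.
def Pre_metasploit_pattern (sets : Option (List String)) : Prop :=
  ∀ l, sets = some l → "" ∉ l
instance (sets : Option (List String)) : Decidable (Pre_metasploit_pattern sets) := by
  unfold Pre_metasploit_pattern; infer_instance
def pvWitness_metasploit_pattern : Option (List String) := some ["AB", "xy"]

def Spec_metasploit_pattern (sets : Option (List String)) (out : List String) : Prop := out = metasploit_pattern_alt sets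
instance (sets : Option (List String)) (out : List String) : Decidable (Spec_metasploit_pattern sets out) := by unfold Spec_metasploit_pattern; infer_instance

-- ===== CLAIM (what is proved, stated in full; the proofs are below) =====
def Claim_equal_metasploit_pattern : Prop := ∀ (sets : Option (List String)), Dom_metasploit_pattern sets → Pre_metasploit_pattern sets → Spec_metasploit_pattern sets (metasploit_pattern sets)

-- ===== LEMMAS AND PROOFS =====

-- the list of all combinations, rightmost set cycling fastest (proof-side pivot)
def pvProduct : List (List Char) → List (List Char)
  | [] => [[]]
  | s :: ss => s.flatMap (fun c => (pvProduct ss).map (fun t => c :: t))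

-- product of the lengths
def pvP (ss : List (List Char)) : Nat := (ss.map List.length).prod

-- the mixed-radix digits of t, selected from the sets, leftmost first
def pvCombo' : List (List Char) → Nat → List Char
  | [], _ => []
  | s :: ss, t => s.getD (t / pvP ss) ' ' :: pvCombo' ss (t % pvP ss)

-- ---- A-side machinery (odometer ↔ suffix of the product list) ----

-- all offsets in range
def pvValid : List (List Char) → List Nat → Prop
  | [], [] => True
  | s :: ss, o :: os => o < s.length ∧ pvValid ss os
  | _, _ => False

-- the combination currently pointed at by the offsets
def pvCombo (ss : List (List Char)) (offs : List Nat) : List Char :=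
  List.zipWith (fun s o => s.getD o ' ') ss offs

-- the combinations not yet emitted, starting at `offs`
def pvSuffix : List (List Char) → List Nat → List (List Char)
  | [], [] => [[]]
  | s :: ss, o :: os =>
      (pvSuffix ss os).map (fun t => s.getD o ' ' :: t)
        ++ (s.drop (o + 1)).flatMap (fun c => (pvProduct ss).map (fun t => c :: t))
  | _, _ => []

lemma pvValid_zeros : ∀ ss : List (List Char), (∀ s ∈ ss, s ≠ []) →
    pvValid ss (List.replicate ss.length 0) := by
  intro ss h
  induction ss with
  | nil => trivial
  | cons s ss ih =>
    refine ⟨?_, ih (fun t ht => h t (List.mem_cons_of_mem _ ht))⟩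
    have : s ≠ [] := h s (List.mem_cons_self)
    exact List.length_pos_iff.mpr this

lemma pvSuffix_zeros : ∀ ss : List (List Char), (∀ s ∈ ss, s ≠ []) →
    pvSuffix ss (List.replicate ss.length 0) = pvProduct ss := by
  intro ss h
  induction ss with
  | nil => rfl
  | cons s ss ih =>
    have hs : s ≠ [] := h s (List.mem_cons_self)
    obtain ⟨c, s', rfl⟩ := List.exists_cons_of_ne_nil hs
    simp only [List.length_cons, List.replicate_succ, pvSuffix, pvProduct,
      ih (fun t ht => h t (List.mem_cons_of_mem _ ht))]
    simp [List.flatMap_cons]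

lemma pvSuffix_head : ∀ ss offs, pvValid ss offs →
    ∃ rest, pvSuffix ss offs = pvCombo ss offs :: rest := by
  intro ss
  induction ss with
  | nil => intro offs hv; cases offs with
    | nil => exact ⟨[], rfl⟩
    | cons o os => exact absurd hv (by simp [pvValid])
  | cons s ss ih =>
    intro offs hv
    cases offs with
    | nil => exact absurd hv (by simp [pvValid])
    | cons o os =>
      obtain ⟨ho, hv'⟩ := hv
      obtain ⟨rest, hrest⟩ := ih os hv'
      refine ⟨rest.map (fun t => s.getD o ' ' :: t)
        ++ (s.drop (o + 1)).flatMap (fun c => (pvProduct ss).map (fun t => c :: t)), ?_⟩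
      simp only [pvSuffix, pvCombo, hrest, List.map_cons, List.cons_append,
        List.zipWith_cons_cons]

lemma pvYieldRow_eq : ∀ ss offs, pvValid ss offs →
    pvYieldRow ss offs = (pvCombo ss offs).map (fun c => String.mk [c]) := by
  intro ss
  induction ss with
  | nil => intro offs _; cases offs <;> rfl
  | cons s ss ih =>
    intro offs hv
    cases offs with
    | nil => exact absurd hv (by simp [pvValid])
    | cons o os =>
      obtain ⟨ho, hv'⟩ := hv
      have hg : s[o]? = some (s.getD o ' ') := by
        simp [List.getD, List.getElem?_eq_getElem ho]
      simp only [pvYieldRow, pvCombo, List.zipWith_cons_cons, List.map_cons]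
      rw [pvCharStr, hg]
      exact congrArg _ (ih os hv')

lemma pvInc_step : ∀ ss offs, (∀ s ∈ ss, s ≠ []) → pvValid ss offs →
    (if (pvInc ss offs).2 then
        pvSuffix ss offs = [pvCombo ss offs] ∧ (pvInc ss offs).1 = List.replicate ss.length 0
      else
        pvSuffix ss offs = pvCombo ss offs :: pvSuffix ss (pvInc ss offs).1
          ∧ pvValid ss (pvInc ss offs).1
          ∧ (pvInc ss offs).1 ≠ List.replicate ss.length 0) := by
  intro ss
  induction ss with
  | nil =>
    intro offs _ hv
    cases offs with
    | nil => simp [pvInc, pvSuffix, pvCombo]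
    | cons o os => exact absurd hv (by simp [pvValid])
  | cons s ss ih =>
    intro offs h hv
    cases offs with
    | nil => exact absurd hv (by simp [pvValid])
    | cons o os =>
      obtain ⟨ho, hv'⟩ := hv
      have hss : ∀ t ∈ ss, t ≠ [] := fun t ht => h t (List.mem_cons_of_mem _ ht)
      have hlen : 0 < s.length := List.length_pos_iff.mpr (h s List.mem_cons_self)
      have hih := ih os hss hv'
      by_cases hc : (pvInc ss os).2 = true
      · rw [if_pos hc] at hih
        obtain ⟨hsuf, hrep⟩ := hih
        by_cases he : o + 1 = s.length
        · -- full rollover at this digit too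
          have ho' : (o + 1) % s.length = 0 := by rw [he]; exact Nat.mod_self _
          have : pvInc (s :: ss) (o :: os) = (0 :: (pvInc ss os).1, true) := by
            simp [pvInc, hc, ho']
          rw [this]
          simp only []
          constructor
          · simp only [pvSuffix, hsuf, pvCombo, List.zipWith_cons_cons, List.map_cons,
              List.map_nil, he, List.drop_length, List.flatMap_nil, List.append_nil]
          · simp [hrep, List.replicate_succ]
        · have hlt : o + 1 < s.length := by omega
          have ho' : (o + 1) % s.length = o + 1 := Nat.mod_eq_of_lt hlt
          have : pvInc (s :: ss) (o :: os) = ((o + 1) :: (pvInc ss os).1, false) := by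
            simp [pvInc, hc, ho']
          rw [this]
          simp only [if_neg Bool.false_ne_true]
          refine ⟨?_, ⟨hlt, hrep ▸ pvValid_zeros ss hss⟩, ?_⟩
          · have hdrop : s.drop (o + 1) = s[o + 1] :: s.drop (o + 2) :=
              List.drop_eq_getElem_cons hlt
            have hgd : s.getD (o + 1) ' ' = s[o + 1] := List.getD_eq_getElem s ' ' hlt
            simp only [pvSuffix, hsuf, hrep, pvSuffix_zeros ss hss, pvCombo,
              List.zipWith_cons_cons, List.map_cons, List.map_nil, hdrop,
              List.flatMap_cons, hgd, List.cons_append,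
              List.nil_append]
          · intro hcon
            rw [List.length_cons, List.replicate_succ] at hcon
            injection hcon with h1 _
            omega
      · rw [if_neg hc] at hih
        obtain ⟨hsuf, hval, hne⟩ := hih
        have hb : (pvInc ss os).2 = false := by revert hc; cases (pvInc ss os).2 <;> simp
        have : pvInc (s :: ss) (o :: os) = (o :: (pvInc ss os).1, false) := by
          simp [pvInc, hb]
        rw [this]
        simp only [if_neg Bool.false_ne_true]
        refine ⟨?_, ⟨ho, hval⟩, ?_⟩
        · simp only [pvSuffix, hsuf, pvCombo, List.zipWith_cons_cons, List.map_cons,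
            List.cons_append]
        · intro hcon
          rw [List.length_cons, List.replicate_succ] at hcon
          injection hcon with _ h2
          exact hne h2

lemma pvLoopA_eq : ∀ fuel ss offs, (∀ s ∈ ss, s ≠ []) → pvValid ss offs →
    fuel = (pvSuffix ss offs).length →
    pvLoopA ss fuel offs = (pvSuffix ss offs).flatMap (fun combo => combo.map (fun c => String.mk [c])) := by
  intro fuel ss
  induction fuel with
  | zero =>
    intro offs h hv hf
    obtain ⟨rest, hrest⟩ := pvSuffix_head ss offs hv
    rw [hrest] at hf
    simp at hf
  | succ n ih =>
    intro offs h hv hf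
    have hstep := pvInc_step ss offs h hv
    by_cases hc : (pvInc ss offs).2 = true
    · rw [if_pos hc] at hstep
      obtain ⟨hsuf, hrep⟩ := hstep
      simp only [pvLoopA, if_pos hrep]
      rw [pvYieldRow_eq ss offs hv, hsuf]
      simp
    · rw [if_neg hc] at hstep
      obtain ⟨hsuf, hval, hne⟩ := hstep
      simp only [pvLoopA, if_neg hne]
      have hn : n = (pvSuffix ss (pvInc ss offs).1).length := by
        rw [hsuf] at hf; simpa using hf
      rw [pvYieldRow_eq ss offs hv, ih _ h hval hn, hsuf]
      simp

lemma pvFoldl_prod : ∀ (ss : List (List Char)) (a : Nat),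
    ss.foldl (fun a s => a * s.length) a = a * pvP ss := by
  intro ss
  induction ss with
  | nil => intro a; simp [pvP]
  | cons s ss ih =>
    intro a
    simp only [List.foldl_cons, ih, pvP, List.map_cons, List.prod_cons]
    ring

lemma pvProduct_length : ∀ ss : List (List Char), (pvProduct ss).length = pvP ss := by
  intro ss
  induction ss with
  | nil => rfl
  | cons s ss ih =>
    simp only [pvProduct, List.length_flatMap, List.length_map, ih, List.map_const',
      List.sum_replicate, smul_eq_mul]
    simp [pvP]

-- A's loop emits exactly the flattened product (proved via the suffix invariant)
lemma pv_keyA : ∀ l : List String, (∀ t ∈ l, t ≠ "") →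
    pvLoopA (l.map String.toList)
        ((l.map String.toList).foldl (fun a s => a * s.length) 1)
        (List.replicate (l.map String.toList).length 0)
      = (pvProduct (l.map String.toList)).flatMap
          (fun combo => combo.map (fun c => String.mk [c])) := by
  intro l hl
  have hne : ∀ s ∈ l.map String.toList, s ≠ [] := by
    intro s hs
    obtain ⟨t, ht, rfl⟩ := List.mem_map.mp hs
    intro hnil
    exact hl t ht (by simpa using hnil)
  have h1 := pvSuffix_zeros (l.map String.toList) hne
  have h2 := pvValid_zeros (l.map String.toList) hne
  have h3 : (l.map String.toList).foldl (fun a s => a * s.length) 1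
      = (pvSuffix (l.map String.toList) (List.replicate (l.map String.toList).length 0)).length := by
    rw [h1, pvFoldl_prod, one_mul, pvProduct_length]
  rw [pvLoopA_eq _ _ _ hne h2 h3, h1]

-- ---- B-side machinery (divmod fold ↔ mixed-radix digits ↔ the product list) ----

lemma pvDigitsFold_eq : ∀ (ss : List (List Char)) (t : Nat) (out0 : List Char),
    ss.reverse.foldl (fun ro s => (ro.1 / s.length, ro.2 ++ [s.getD (ro.1 % s.length) ' '])) (t, out0)
      = (t / pvP ss, out0 ++ (pvCombo' ss (t % pvP ss)).reverse) := by
  intro ss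
  induction ss with
  | nil => intro t out0; simp [pvP, pvCombo', ]
  | cons s ss ih =>
    intro t out0
    have hP : pvP (s :: ss) = s.length * pvP ss := by simp [pvP]
    rw [List.reverse_cons, List.foldl_append, ih]
    simp only [List.foldl_cons, List.foldl_nil, Prod.mk.injEq]
    refine ⟨?_, ?_⟩
    · rw [Nat.div_div_eq_div_mul, hP, Nat.mul_comm]
    · rw [hP]
      have h1 : t % (s.length * pvP ss) % pvP ss = t % pvP ss :=
        Nat.mod_mod_of_dvd t (dvd_mul_left (pvP ss) s.length)
      have h2 : t % (s.length * pvP ss) / pvP ss = t / pvP ss % s.length := by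
        rw [Nat.mul_comm s.length (pvP ss)]
        exact Nat.mod_mul_right_div_self t (pvP ss) s.length
      simp [pvCombo', h1, h2, List.append_assoc]

-- List.range (a*b) split into b-sized blocks
lemma pvRange_mul : ∀ a b : Nat,
    List.range (a * b) = (List.range a).flatMap (fun i => (List.range b).map (fun j => b * i + j)) := by
  intro a b
  induction a with
  | zero => simp
  | succ n ih =>
    have h1 : (n + 1) * b = n * b + b := by ring
    rw [h1, List.range_add, ih, List.range_succ, List.flatMap_append]
    simp only [List.flatMap_cons, List.flatMap_nil, List.append_nil]
    congr 1
    apply List.map_congr_left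
    intro j _
    ring

lemma pvGetD_range : ∀ s : List Char,
    (List.range s.length).map (fun i => s.getD i ' ') = s := by
  intro s
  induction s with
  | nil => rfl
  | cons c s ih =>
    rw [List.length_cons, List.range_succ_eq_map, List.map_cons, List.map_map]
    have hc : ((fun i => (c :: s).getD i ' ') ∘ Nat.succ) = (fun i => s.getD i ' ') := by
      funext i; simp
    rw [List.getD_cons_zero, hc, ih]

lemma pvRange_combo : ∀ ss : List (List Char),
    (List.range (pvP ss)).map (fun k => pvCombo' ss k) = pvProduct ss := by
  intro ss
  induction ss with
  | nil => simp [pvP, pvCombo', pvProduct]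
  | cons s ss ih =>
    by_cases hz : pvP ss = 0
    · have hP : pvP (s :: ss) = 0 := by simp [pvP] at hz ⊢; right; exact hz
      have hprod : pvProduct ss = [] := by
        have := pvProduct_length ss
        rw [hz] at this
        exact List.length_eq_zero_iff.mp this
      simp [hP, pvProduct, hprod]
    · have hzpos : 0 < pvP ss := Nat.pos_of_ne_zero hz
      have hP : pvP (s :: ss) = s.length * pvP ss := by simp [pvP]
      rw [hP, pvRange_mul, List.map_flatMap]
      have hblock : ∀ i, ((List.range (pvP ss)).map (fun j => pvP ss * i + j)).map
          (fun k => pvCombo' (s :: ss) k)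
          = (pvProduct ss).map (fun t => s.getD i ' ' :: t) := by
        intro i
        rw [List.map_map, ← ih, List.map_map]
        apply List.map_congr_left
        intro j hj
        have hjlt : j < pvP ss := List.mem_range.mp hj
        simp only [Function.comp, pvCombo']
        have hd : (pvP ss * i + j) / pvP ss = i := by
          rw [Nat.mul_add_div hzpos, Nat.div_eq_of_lt hjlt]; omega
        have hm : (pvP ss * i + j) % pvP ss = j := by
          rw [Nat.mul_add_mod, Nat.mod_eq_of_lt hjlt]
        rw [hd, hm]
      calc (List.range s.length).flatMap
            (fun i => ((List.range (pvP ss)).map (fun j => pvP ss * i + j)).map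
              (fun k => pvCombo' (s :: ss) k))
          = (List.range s.length).flatMap
            (fun i => (pvProduct ss).map (fun t => s.getD i ' ' :: t)) := by
            apply List.flatMap_congr; intro i _; exact hblock i
        _ = ((List.range s.length).map (fun i => s.getD i ' ')).flatMap
            (fun c => (pvProduct ss).map (fun t => c :: t)) := by
            rw [List.flatMap_map]
        _ = pvProduct (s :: ss) := by rw [pvGetD_range]; rfl

-- B emits exactly the flattened product
lemma pv_keyB : ∀ l : List String,
    metasploit_pattern_alt (some l) = (pvProduct ((match (some l : Option (List String)) with
      | none => pvDefaultSets
      | some [] => pvDefaultSets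
      | some (x :: xs) => x :: xs).map String.toList)).flatMap
        (fun combo => combo.map (fun c => String.mk [c])) := by
  intro l
  unfold metasploit_pattern_alt
  simp only []
  generalize ((match (some l : Option (List String)) with
      | none => pvDefaultSets
      | some [] => pvDefaultSets
      | some (x :: xs) => x :: xs).map String.toList) = ss
  rw [pvFoldl_prod, one_mul, ← pvRange_combo, List.flatMap_map]
  apply List.flatMap_congr
  intro k hk
  have hklt : k < pvP ss := List.mem_range.mp hk
  simp only [pvDigitsFold, pvDigitsFold_eq, List.nil_append,
    List.reverse_reverse, Nat.mod_eq_of_lt hklt]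

lemma pv_keyB' : metasploit_pattern_alt none
    = (pvProduct (pvDefaultSets.map String.toList)).flatMap
        (fun combo => combo.map (fun c => String.mk [c])) := by
  unfold metasploit_pattern_alt
  simp only []
  rw [pvFoldl_prod, one_mul, ← pvRange_combo, List.flatMap_map]
  apply List.flatMap_congr
  intro k hk
  have hklt : k < pvP (pvDefaultSets.map String.toList) := List.mem_range.mp hk
  simp only [pvDigitsFold, pvDigitsFold_eq, List.nil_append,
    List.reverse_reverse, Nat.mod_eq_of_lt hklt]

-- ===== VERDICT (by name: the statements are the Claim_ definitions above) =====
theorem metasploit_pattern_spec : Claim_equal_metasploit_pattern := by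
  intro sets hdom hpre
  unfold Spec_metasploit_pattern
  cases sets with
  | none =>
    rw [pv_keyB']
    unfold metasploit_pattern
    exact pv_keyA pvDefaultSets (by decide)
  | some l =>
    rw [pv_keyB l]
    unfold metasploit_pattern
    cases l with
    | nil => exact pv_keyA pvDefaultSets (by decide)
    | cons x xs =>
      have hl : ∀ t ∈ x :: xs, t ≠ "" := fun t ht hteq => hpre (x :: xs) rfl (hteq ▸ ht)
      exact pv_keyA (x :: xs) hl
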